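-- pv_equiv track=rewrite | github.com/RohWS/Algorithm | 프로그래머스/0/181935. 홀짝에 따라 다른 값 반환하기/홀짝에 따라 다른 값 반환하기.py | solution
-- ===== SOURCE A (Python) =====
-- def solution(n):
--     n_list = []
--     n_sum = 0
--     i = 0
--     n_even_sum = 0
--     n_even = 0
--     if n%2 ==0:
--         for i3 in range(n):
--             if i3%2 == 0:
--                 n_list.append(i3)
--         for i4 in range(len(n_list)):
--             n_even_sum = n_even_sum + (n_list[i4]*n_list[i4])
--         answer = n_even_sum + n*n
--     else:
--         for i in range(n):
--             if i%(2) != 0: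
--                 n_list.append(i)
--         for i2 in range(len(n_list)):
--             n_sum = n_sum + n_list[i2]
--         answer = n_sum + n
--
--     return answer
-- ===== SOURCE B (Python) =====
-- def solution(n):
--     if n % 2 == 0:
--         m = max(n // 2, 0)          # number of even terms 0,2,...,n-2 in range(n)
--         return 4 * (m - 1) * m * (2 * m - 1) // 6 + n * n
--     else:
--         m = max((n - 1) // 2, 0)    # number of odd terms 1,3,...,n-2 in range(n)
--         return m * m + n
-- ===== Notes on version B (the rewrite author's own statement) =====
-- stated objective: faster
-- what changed: Replaced A's two loops (build a parity-filtered list of range(n), then sum it by index) with constant-time closed-form series formulas: the square-pyramidal formula for the sum of squares of the evens below n, and the perfect-square formula for the sum of the odds below n.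
import Mathlib
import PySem

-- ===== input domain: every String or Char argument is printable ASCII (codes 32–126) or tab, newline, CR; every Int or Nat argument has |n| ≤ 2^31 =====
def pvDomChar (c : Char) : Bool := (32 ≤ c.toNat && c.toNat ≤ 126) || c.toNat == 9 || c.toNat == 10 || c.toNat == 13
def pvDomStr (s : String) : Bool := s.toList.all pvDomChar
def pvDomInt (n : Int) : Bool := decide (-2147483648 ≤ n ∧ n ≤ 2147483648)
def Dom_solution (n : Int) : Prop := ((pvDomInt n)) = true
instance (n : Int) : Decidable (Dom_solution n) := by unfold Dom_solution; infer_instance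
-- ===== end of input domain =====

-- B replaces A's two O(n) loops with O(1) closed-form series formulas; return values agree for every Int n.

-- ===== PORT A =====
def solution (n : Int) : Int :=
  if PySem.Int.mod n 2 == 0 then
    -- for i3 in range(n): if i3 % 2 == 0: n_list.append(i3)
    let nList : List Int :=
      (PySem.List.pyRange 0 n 1).foldl
        (fun acc i3 => if PySem.Int.mod i3 2 == 0 then acc ++ [i3] else acc) []
    -- for i4 in range(len(n_list)): n_even_sum += n_list[i4] * n_list[i4]
    let nEvenSum : Int :=
      (PySem.List.pyRange 0 (nList.length : Int) 1).foldl
        (fun acc i4 => acc + (PySem.List.pyGetD nList i4 0) * (PySem.List.pyGetD nList i4 0)) 0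
    nEvenSum + n * n
  else
    -- for i in range(n): if i % 2 != 0: n_list.append(i)
    let nList : List Int :=
      (PySem.List.pyRange 0 n 1).foldl
        (fun acc i => if PySem.Int.mod i 2 != 0 then acc ++ [i] else acc) []
    -- for i2 in range(len(n_list)): n_sum += n_list[i2]
    let nSum : Int :=
      (PySem.List.pyRange 0 (nList.length : Int) 1).foldl
        (fun acc i2 => acc + PySem.List.pyGetD nList i2 0) 0
    nSum + n

-- ===== PORT B =====
def solution_alt (n : Int) : Int :=
  if PySem.Int.mod n 2 == 0 then
    let m := max (PySem.Int.floordiv n 2) 0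
    PySem.Int.floordiv (4 * (m - 1) * m * (2 * m - 1)) 6 + n * n
  else
    let m := max (PySem.Int.floordiv (n - 1) 2) 0
    m * m + n

-- ===== PRECONDITION & SPEC =====
def Spec_solution (n : Int) (out : Int) : Prop := out = solution_alt n
instance (n : Int) (out : Int) : Decidable (Spec_solution n out) := by unfold Spec_solution; infer_instance

-- ===== CLAIM (what is proved, stated in full; the proofs are below) =====
def Claim_equal_solution : Prop := ∀ (n : Int), Dom_solution n → Spec_solution n (solution n)

-- ===== LEMMAS AND PROOFS =====

lemma mod_two_even (k : Int) : PySem.Int.mod (2 * k) 2 = 0 := by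
  rw [PySem.Int.mod_eq_emod_of_pos (by norm_num)]; omega

lemma mod_two_odd (k : Int) : PySem.Int.mod (2 * k + 1) 2 = 1 := by
  rw [PySem.Int.mod_eq_emod_of_pos (by norm_num)]; omega

-- 6 x (sum of squares of the even numbers below 2m) = 4(m-1)m(2m-1)
lemma sum_sq_evens (m : Nat) :
    6 * ((((PySem.List.pyRange 0 (2 * (m : Int)) 1).filter
        (fun i => PySem.Int.mod i 2 == 0)).map (fun x => x * x)).sum)
      = 4 * ((m : Int) - 1) * m * (2 * m - 1) := by
  induction m with
  | zero => simp [PySem.List.pyRange_one_eq_nil]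
  | succ m ih =>
    push_cast
    rw [show (2 : Int) * ((m : Int) + 1) = (2 * (m : Int) + 1) + 1 from by ring,
        PySem.List.pyRange_one_succ_right (by positivity),
        show (2 : Int) * (m : Int) + 1 = (2 * (m : Int)) + 1 from rfl,
        PySem.List.pyRange_one_succ_right (by positivity)]
    simp only [List.filter_append, List.map_append, List.sum_append, List.filter_cons,
      List.filter_nil, mod_two_even, mod_two_odd, beq_self_eq_true, if_true,
      show ((1 : Int) == 0) = false from rfl, Bool.false_eq_true, if_false,
      List.map_cons, List.map_nil, List.sum_cons, List.sum_nil]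
    linear_combination ih

-- the sum of the odd numbers below 2m+1 equals m^2
lemma sum_odds (m : Nat) :
    (((PySem.List.pyRange 0 (2 * (m : Int) + 1) 1).filter
        (fun i => PySem.Int.mod i 2 != 0)).sum) = (m : Int) * m := by
  induction m with
  | zero =>
    rw [show (2 : Int) * ((0 : Nat) : Int) + 1 = 0 + 1 from by norm_num,
        PySem.List.pyRange_one_succ_right (by norm_num)]
    simp [PySem.List.pyRange_one_eq_nil]
  | succ m ih =>
    push_cast
    rw [show (2 : Int) * ((m : Int) + 1) + 1 = ((2 * (m : Int) + 1) + 1) + 1 from by ring,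
        PySem.List.pyRange_one_succ_right (by positivity),
        PySem.List.pyRange_one_succ_right (by positivity)]
    simp only [List.filter_append, List.sum_append, List.filter_cons, List.filter_nil,
      mod_two_odd,
      show (2 : Int) * (m : Int) + 1 + 1 = 2 * ((m : Int) + 1) from by ring, mod_two_even,
      bne_self_eq_false, Bool.false_eq_true, if_false,
      show ((1 : Int) != 0) = true from rfl, if_true, List.sum_cons, List.sum_nil]
    linear_combination ih

-- ===== VERDICT (by name: the statement is the Claim_ definition above) =====
theorem solution_spec : Claim_equal_solution := by
  intro n _
  unfold Spec_solution solution solution_alt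
  by_cases he : (PySem.Int.mod n 2 == 0) = true
  · rw [if_pos he, if_pos he]
    have hL : (List.foldl (fun (acc : List Int) i3 =>
          if PySem.Int.mod i3 2 == 0 then acc ++ [i3] else acc) [] (PySem.List.pyRange 0 n 1))
        = (PySem.List.pyRange 0 n 1).filter (fun i => PySem.Int.mod i 2 == 0) := by
      simpa using PySem.List.foldl_append_if (fun i => PySem.Int.mod i 2 == 0) id
        (PySem.List.pyRange 0 n 1) []
    simp only [hL]
    rw [PySem.List.foldl_pyRange_zero_pyGetD'
          ((PySem.List.pyRange 0 n 1).filter (fun i => PySem.Int.mod i 2 == 0)) 0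
          (fun acc x => acc + x * x) 0,
        PySem.List.foldl_add _ (fun x => x * x) 0, zero_add]
    have hdvd : (2 : Int) ∣ n := (PySem.Int.mod_eq_zero_iff_dvd n 2).mp (by simpa using he)
    obtain ⟨k, hk⟩ := hdvd
    by_cases hn : 0 < n
    · have hm : max (PySem.Int.floordiv n 2) 0 = k := by
        rw [PySem.Int.floordiv_eq_ediv_of_pos (by norm_num)]; omega
      have hE := sum_sq_evens k.toNat
      rw [show ((k.toNat : Nat) : Int) = k from by omega] at hE
      rw [hm, hk, PySem.Int.floordiv_eq_ediv_of_pos (by norm_num), ← hE,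
        Int.mul_ediv_cancel_left _ (by norm_num)]
    · have hnil : PySem.List.pyRange 0 n 1 = [] := PySem.List.pyRange_one_eq_nil (by omega)
      have hm : max (PySem.Int.floordiv n 2) 0 = 0 := by
        rw [PySem.Int.floordiv_eq_ediv_of_pos (by norm_num)]; omega
      rw [hnil, hm]
      norm_num [PySem.List.pyRange_one_eq_nil]
  · rw [if_neg he, if_neg he]
    have hL : (List.foldl (fun (acc : List Int) i =>
          if PySem.Int.mod i 2 != 0 then acc ++ [i] else acc) [] (PySem.List.pyRange 0 n 1))
        = (PySem.List.pyRange 0 n 1).filter (fun i => PySem.Int.mod i 2 != 0) := by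
      simpa using PySem.List.foldl_append_if (fun i => PySem.Int.mod i 2 != 0) id
        (PySem.List.pyRange 0 n 1) []
    simp only [hL]
    rw [PySem.List.foldl_pyRange_zero_pyGetD'
          ((PySem.List.pyRange 0 n 1).filter (fun i => PySem.Int.mod i 2 != 0)) 0
          (fun acc x => acc + x) 0,
        PySem.List.foldl_add _ (fun x => x) 0, zero_add, List.map_id']
    have hmod : PySem.Int.mod n 2 ≠ 0 := by simpa using he
    rw [PySem.Int.mod_eq_emod_of_pos (by norm_num)] at hmod
    obtain ⟨k, hk⟩ : ∃ k, n = 2 * k + 1 := ⟨(n - 1) / 2, by omega⟩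
    by_cases hn : 0 < n
    · have hm : max (PySem.Int.floordiv (n - 1) 2) 0 = k := by
        rw [PySem.Int.floordiv_eq_ediv_of_pos (by norm_num)]; omega
      have hO := sum_odds k.toNat
      rw [show ((k.toNat : Nat) : Int) = k from by omega] at hO
      rw [hm, hk, hO]
    · have hnil : PySem.List.pyRange 0 n 1 = [] := PySem.List.pyRange_one_eq_nil (by omega)
      have hm : max (PySem.Int.floordiv (n - 1) 2) 0 = 0 := by
        rw [PySem.Int.floordiv_eq_ediv_of_pos (by norm_num)]; omega
      rw [hnil, hm]
      norm_num [PySem.List.pyRange_one_eq_nil]
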